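-- pv_equiv track=rewrite | github.com/shikixyx/AtCoder | CodeChef/April Challenge/1.py | solve
-- ===== SOURCE A (Python) =====
-- MOD = 10 ** 9 + 7
--
-- def solve(N, P):
--     P.sort(reverse=True)
--     ret = 0
--
--     for i in range(N):
--         p = P[i] - i
--         if p < 0:
--             break
--         ret += p
--         ret %= MOD
--
--     return ret
-- ===== SOURCE B (Python) =====
-- MOD = 10 ** 9 + 7
--
-- def solve(N, P):
--     P.sort(reverse=True)
--     lo, hi = 0, min(N, len(P))
--     while lo < hi:
--         mid = (lo + hi + 1) // 2
--         if P[mid - 1] >= mid - 1: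
--             lo = mid
--         else:
--             hi = mid - 1
--     return (sum(P[:lo]) - lo * (lo - 1) // 2) % MOD
-- ===== Notes on version B (the rewrite author's own statement) =====
-- stated objective: alternative
-- what changed: After the in-place descending sort, the linear scan with per-step modular accumulation is replaced by a binary search for the cutoff k (P[i]-i is monotone once P is sorted) plus a closed form: (sum(P[:k]) - k*(k-1)//2) % MOD.
-- outside the precondition, e.g. on solve(3, [-1]): A returns 0, B returns 0; on solve(3, [5]): A raises IndexError, B returns 5
import Mathlib
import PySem

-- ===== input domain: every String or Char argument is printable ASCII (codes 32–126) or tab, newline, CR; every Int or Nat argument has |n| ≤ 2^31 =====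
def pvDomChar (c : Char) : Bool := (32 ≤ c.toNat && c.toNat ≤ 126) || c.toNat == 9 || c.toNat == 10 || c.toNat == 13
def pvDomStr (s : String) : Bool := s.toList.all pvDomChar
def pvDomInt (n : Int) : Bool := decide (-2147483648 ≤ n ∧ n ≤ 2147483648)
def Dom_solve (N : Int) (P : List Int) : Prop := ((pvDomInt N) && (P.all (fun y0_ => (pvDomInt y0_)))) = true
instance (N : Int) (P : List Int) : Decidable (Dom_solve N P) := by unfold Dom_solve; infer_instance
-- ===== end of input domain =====

-- B replaces A's linear scan (after the same in-place descending sort of P) by a binary search for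
-- the cutoff plus a prefix-sum/triangular-number closed form; equal return values on Pre_solve.
-- Both A and B sort P in place (the caller observes the same mutation).

-- ===== PORT A =====
def pyMOD : Int := 10 ^ 9 + 7

-- the for-i-in-range(N) loop with its break, iterating i directly (range is lazy in Python);
-- the fuel argument only guards totality: N.toNat bounds the number of iterations
def solveLoop (Q : List Int) (N : Int) : Nat → Int → Int → Int
  | 0, _, ret => ret
  | fuel + 1, i, ret =>
    if i < N then
      match PySem.List.pyGet? Q i with
      | none => ret  -- Python raises IndexError here; excluded by Pre_solve
      | some qi =>
        let p := qi - i
        if p < 0 then ret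
        else solveLoop Q N fuel (i + 1) (PySem.Int.mod (ret + p) pyMOD)
    else ret

def solve (N : Int) (P : List Int) : Int :=
  solveLoop (PySem.List.sorted P (fun x => x) true) N N.toNat 0 0

-- ===== PORT B =====
-- the while loop, with a fuel argument that only guards totality ((hi-lo).toNat bounds the
-- number of iterations: each step strictly shrinks hi-lo)
def bsGo (Q : List Int) : Nat → Int → Int → Int
  | 0, lo, _ => lo
  | fuel + 1, lo, hi =>
    if lo < hi then
      let mid := PySem.Int.floordiv (lo + hi + 1) 2
      match PySem.List.pyGet? Q (mid - 1) with
      | none => lo  -- IndexError in Python; unreachable when 0 ≤ lo ∧ hi ≤ Q.length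
      | some v =>
        if mid - 1 ≤ v then bsGo Q fuel mid hi else bsGo Q fuel lo (mid - 1)
    else lo

def solve_alt (N : Int) (P : List Int) : Int :=
  let Q := PySem.List.sorted P (fun x => x) true
  let hi := min N (Q.length : Int)
  let lo := bsGo Q hi.toNat 0 hi
  PySem.Int.mod ((PySem.List.slice Q none (some lo)).sum
      - PySem.Int.floordiv (lo * (lo - 1)) 2) pyMOD

-- ===== PRECONDITION & SPEC =====
-- Pre_solve excludes inputs with N > len(P): there A raises IndexError unless the descending scan
-- breaks early on a negative difference (and where A does return, B happens to agree anyway).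
def Pre_solve (N : Int) (P : List Int) : Prop := N ≤ (P.length : Int)
instance (N : Int) (P : List Int) : Decidable (Pre_solve N P) := by unfold Pre_solve; infer_instance

def pvWitness_solve : Int × List Int := (3, [5, 1, 4])

def Spec_solve (N : Int) (P : List Int) (out : Int) : Prop := out = solve_alt N P
instance (N : Int) (P : List Int) (out : Int) : Decidable (Spec_solve N P out) := by unfold Spec_solve; infer_instance

-- ===== CLAIM (what is proved, stated in full; the proofs are below) =====
def Claim_equal_solve : Prop := ∀ (N : Int) (P : List Int), Dom_solve N P → Pre_solve N P → Spec_solve N P (solve N P)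

-- ===== LEMMAS AND PROOFS =====

theorem pyMOD_pos : (0 : Int) < pyMOD := by norm_num [pyMOD]

theorem bsMid_bounds (lo hi : Int) (h : lo < hi) :
    lo < PySem.Int.floordiv (lo + hi + 1) 2 ∧ PySem.Int.floordiv (lo + hi + 1) 2 ≤ hi := by
  rw [PySem.Int.floordiv_eq_ediv_of_pos (by norm_num)]
  omega

-- descending order: any later good index makes every earlier index good
theorem good_mono (Q : List Int) (hQ : Q.Pairwise (fun x y : Int => y ≤ x)) {i j : Nat}
    (hij : i ≤ j) (hj : j < Q.length) (hgj : (j : Int) ≤ Q.getD j 0) :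
    (i : Int) ≤ Q.getD i 0 := by
  rcases Nat.lt_or_ge i j with hlt | hge
  · have hi : i < Q.length := lt_trans hlt hj
    have hle : Q[j] ≤ Q[i] := (List.pairwise_iff_getElem.mp hQ) i j hi hj hlt
    rw [List.getD_eq_getElem _ _ hi]
    rw [List.getD_eq_getElem _ _ hj] at hgj
    have hc : (i : Int) ≤ (j : Int) := by exact_mod_cast hij
    linarith
  · have : i = j := le_antisymm hij hge
    subst this; exact hgj

theorem not_good_of_ge (Q : List Int) (n m i : Nat) (hQ : Q.Pairwise (fun x y : Int => y ≤ x))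
    (hnQ : n ≤ Q.length) (hstop : m < n → ¬((m : Int) ≤ Q.getD m 0))
    (hmi : m ≤ i) (hin : i < n) : ¬ ((i : Int) ≤ Q.getD i 0) := by
  intro hg
  exact hstop (lt_of_le_of_lt hmi hin)
    (good_mono Q hQ hmi (lt_of_lt_of_le hin hnQ) hg)

theorem loopA_stop (Q : List Int) (n m a fuel : Nat) (hQ : Q.Pairwise (fun x y : Int => y ≤ x))
    (hnQ : n ≤ Q.length) (hstop : m < n → ¬((m : Int) ≤ Q.getD m 0))
    (hma : m ≤ a) (han : a ≤ n) (ret : Int) :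
    solveLoop Q (n : Int) fuel ((a : Nat) : Int) ret = ret := by
  cases fuel with
  | zero => rfl
  | succ f =>
    rcases Nat.lt_or_ge a n with hlt | hge
    · have haQ : a < Q.length := lt_of_lt_of_le hlt hnQ
      have hget : PySem.List.pyGet? Q ((a : Nat) : Int) = some Q[a] := by
        rw [PySem.List.pyGet?_natCast]; exact List.getElem?_eq_getElem haQ
      have hbad := not_good_of_ge Q n m a hQ hnQ hstop hma hlt
      rw [List.getD_eq_getElem _ _ haQ] at hbad
      simp only [solveLoop, hget]
      rw [if_pos (show ((a : Nat) : Int) < (n : Int) by exact_mod_cast hlt), if_pos (by omega)]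
    · simp only [solveLoop]
      rw [if_neg (by exact_mod_cast Nat.not_lt.mpr hge)]

theorem loopA_go (Q : List Int) (n m : Nat) (hQ : Q.Pairwise (fun x y : Int => y ≤ x))
    (hnQ : n ≤ Q.length) (hmn : m ≤ n)
    (hgood : ∀ i, i < m → (i : Int) ≤ Q.getD i 0)
    (hstop : m < n → ¬((m : Int) ≤ Q.getD m 0)) :
    ∀ (k fuel a : Nat) (ret : Int), m - a = k → n - a ≤ fuel → a ≤ m → 0 ≤ ret → ret < pyMOD →
      solveLoop Q (n : Int) fuel ((a : Nat) : Int) ret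
        = PySem.Int.mod (ret + ∑ i ∈ Finset.Ico a m, (Q.getD i 0 - (i : Int))) pyMOD := by
  intro k
  induction k with
  | zero =>
    intro fuel a ret hk hfuel ham h0 h1
    have : a = m := by omega
    rw [loopA_stop Q n m a fuel hQ hnQ hstop (by omega) (by omega) ret, this,
      Finset.Ico_self, Finset.sum_empty, add_zero,
      PySem.Int.mod_eq_emod_of_pos pyMOD_pos, Int.emod_eq_of_lt h0 h1]
  | succ k IH =>
    intro fuel a ret hk hfuel ham h0 h1
    have ha : a < m := by omega
    have han : a < n := lt_of_lt_of_le ha hmn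
    have haQ : a < Q.length := lt_of_lt_of_le han hnQ
    have hga := hgood a ha
    rw [List.getD_eq_getElem _ _ haQ] at hga
    cases fuel with
    | zero => omega
    | succ f =>
      have hget : PySem.List.pyGet? Q ((a : Nat) : Int) = some Q[a] := by
        rw [PySem.List.pyGet?_natCast]; exact List.getElem?_eq_getElem haQ
      simp only [solveLoop, hget]
      rw [if_pos (show ((a : Nat) : Int) < (n : Int) by exact_mod_cast han), if_neg (by omega)]
      have hcast : ((a : Nat) : Int) + 1 = ((a + 1 : Nat) : Int) := by push_cast; ring
      rw [hcast,
        IH f (a + 1) (PySem.Int.mod (ret + (Q[a] - (a : Int))) pyMOD) (by omega) (by omega)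
          (by omega) (PySem.Int.mod_nonneg _ pyMOD_pos) (PySem.Int.mod_lt _ pyMOD_pos)]
      rw [Finset.sum_eq_sum_Ico_succ_bot ha]
      rw [PySem.Int.mod_eq_emod_of_pos pyMOD_pos, PySem.Int.mod_eq_emod_of_pos pyMOD_pos,
        PySem.Int.mod_eq_emod_of_pos pyMOD_pos, Int.emod_add_emod,
        List.getD_eq_getElem _ _ haQ]
      ring_nf

theorem bsLoop_eq (Q : List Int) (n m : Nat) (hQ : Q.Pairwise (fun x y : Int => y ≤ x))
    (hnQ : n ≤ Q.length) (hmn : m ≤ n)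
    (hgood : ∀ i, i < m → (i : Int) ≤ Q.getD i 0)
    (hstop : m < n → ¬((m : Int) ≤ Q.getD m 0)) :
    ∀ (fuel : Nat) (lo hi : Int), (hi - lo).toNat ≤ fuel → 0 ≤ lo → lo ≤ (m : Int) →
      (m : Int) ≤ hi → hi ≤ (n : Int) → bsGo Q fuel lo hi = (m : Int) := by
  intro fuel
  induction fuel with
  | zero =>
    intro lo hi hk h0 hlm hmh hhn
    have : (m : Int) = lo := by omega
    simp [bsGo, ← this]
  | succ fuel IH =>
    intro lo hi hk h0 hlm hmh hhn
    by_cases hlh : lo < hi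
    · rw [bsGo, if_pos hlh]
      obtain ⟨hm1, hm2⟩ := bsMid_bounds lo hi hlh
      have hnL : (n : Int) ≤ (Q.length : Int) := by exact_mod_cast hnQ
      have hmi0 : 0 ≤ PySem.Int.floordiv (lo + hi + 1) 2 - 1 := by omega
      have hmiL : PySem.Int.floordiv (lo + hi + 1) 2 - 1 < (Q.length : Int) := by omega
      have hget := PySem.List.pyGet?_eq_some_getElem Q hmi0 hmiL
      set j := (PySem.Int.floordiv (lo + hi + 1) 2 - 1).toNat with hjdef
      have hjx : (j : Int) = PySem.Int.floordiv (lo + hi + 1) 2 - 1 := Int.toNat_of_nonneg hmi0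
      have hjQ : j < Q.length := by omega
      simp only [hget]
      by_cases hcond : PySem.Int.floordiv (lo + hi + 1) 2 - 1 ≤ Q[j]
      · rw [if_pos hcond]
        have hjn : j < n := by omega
        have hjm : j < m := by
          by_contra h'
          push_neg at h'
          refine not_good_of_ge Q n m j hQ hnQ hstop h' hjn ?_
          rw [List.getD_eq_getElem _ _ hjQ]
          omega
        exact IH _ _ (by omega) (by omega) (by omega) hmh hhn
      · rw [if_neg hcond]
        have hjm : (m : Int) ≤ j := by
          rcases Nat.lt_or_ge j m with hlt | hge
          · exfalso
            have := hgood j hlt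
            rw [List.getD_eq_getElem _ _ hjQ] at this
            omega
          · exact_mod_cast hge
        exact IH _ _ (by omega) h0 hlm (by omega) (by omega)
    · rw [bsGo, if_neg hlh]
      omega

theorem take_sum (Q : List Int) :
    ∀ (m : Nat), m ≤ Q.length → (Q.take m).sum = ∑ i ∈ Finset.range m, Q.getD i 0 := by
  intro m
  induction m with
  | zero => simp
  | succ k IH =>
    intro h
    have hk : k < Q.length := by omega
    have hts : Q.take (k + 1) = Q.take k ++ [Q[k]] := by
      rw [List.take_add_one, List.getElem?_eq_getElem hk]
      rfl
    rw [Finset.sum_range_succ, ← IH (by omega), hts, List.sum_append,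
      List.getD_eq_getElem _ _ hk]
    simp

theorem main_core (N : Int) (P : List Int) (hPre : N ≤ (P.length : Int)) (hN : 0 ≤ N) (m : Nat)
    (hmn : m ≤ N.toNat)
    (hgood : ∀ i, i < m → (i : Int) ≤ (PySem.List.sorted P (fun x => x) true).getD i 0)
    (hstop : m < N.toNat →
      ¬((m : Int) ≤ (PySem.List.sorted P (fun x => x) true).getD m 0)) :
    solve N P = solve_alt N P := by
  set Q := PySem.List.sorted P (fun x => x) true with hQdef
  have hQlen : Q.length = P.length := PySem.List.length_sorted P (fun x => x) true
  have hQ : Q.Pairwise (fun x y : Int => y ≤ x) := by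
    simpa using PySem.List.sorted_pairwise_rev P (fun x => x)
  set n := N.toNat with hndef
  have hnN : (n : Int) = N := Int.toNat_of_nonneg hN
  have hnQ : n ≤ Q.length := by omega
  have hmin : min N (Q.length : Int) = N := min_eq_left (by omega)
  have hbs : bsGo Q (min N (Q.length : Int)).toNat 0 (min N (Q.length : Int)) = (m : Int) := by
    rw [hmin, ← hnN]
    exact bsLoop_eq Q n m hQ hnQ hmn hgood hstop n 0 (n : Int)
      (by omega) (le_refl 0) (by exact_mod_cast Nat.zero_le m) (by exact_mod_cast hmn) (le_refl _)
  have hA : solveLoop Q N N.toNat 0 0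
      = PySem.Int.mod (0 + ∑ i ∈ Finset.Ico 0 m, (Q.getD i 0 - (i : Int))) pyMOD := by
    rw [← hnN]
    have := loopA_go Q n m hQ hnQ hmn hgood hstop m ((n : Int).toNat) 0 0 (by omega)
      (by omega) (Nat.zero_le m) (le_refl 0) pyMOD_pos
    simpa using this
  have hslice : PySem.List.slice Q none (some ((m : Nat) : Int)) = Q.take m := by
    rw [PySem.List.slice_to Q (Int.natCast_nonneg m)]
    simp
  have htri : PySem.Int.floordiv ((m : Int) * ((m : Int) - 1)) 2
      = ∑ i ∈ Finset.range m, (i : Int) := by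
    have h2 : (∑ i ∈ Finset.range m, (i : Int)) * 2 = (m : Int) * ((m : Int) - 1) := by
      rcases Nat.eq_zero_or_pos m with h | h
      · subst h; simp
      · have hh := Finset.sum_range_id_mul_two m
        have hcast : ((∑ i ∈ Finset.range m, i : Nat) : Int) * 2
            = (m : Int) * (((m - 1 : Nat)) : Int) := by exact_mod_cast hh
        rw [Nat.cast_sum] at hcast
        rw [hcast]
        congr 1
        omega
    rw [PySem.Int.floordiv_eq_ediv_of_pos (by norm_num), ← h2,
      Int.mul_ediv_cancel _ (by norm_num)]
  show solveLoop Q N N.toNat 0 0 = _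
  rw [hA]
  show _ = PySem.Int.mod ((PySem.List.slice Q none
        (some (bsGo Q (min N (Q.length : Int)).toNat 0 (min N (Q.length : Int))))).sum
      - PySem.Int.floordiv ((bsGo Q (min N (Q.length : Int)).toNat 0 (min N (Q.length : Int)))
        * ((bsGo Q (min N (Q.length : Int)).toNat 0 (min N (Q.length : Int))) - 1)) 2) pyMOD
  rw [hbs, hslice, take_sum Q m (le_trans hmn hnQ), htri, zero_add]
  congr 1
  rw [Finset.range_eq_Ico, Finset.sum_sub_distrib]

-- ===== VERDICT (by name: the statement is the Claim_ definition above) =====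
theorem solve_spec : Claim_equal_solve := by
  intro N P _ hPre
  unfold Pre_solve at hPre
  unfold Spec_solve
  rcases lt_or_ge N 0 with hN | hN
  · -- empty loop on both sides: both return 0
    show solveLoop _ N N.toNat 0 0 = _
    have hz : N.toNat = 0 := by omega
    rw [hz]
    show (0 : Int) = _
    set Q := PySem.List.sorted P (fun x => x) true with hQdef
    have hmin : min N (Q.length : Int) = N := min_eq_left (by omega)
    show (0 : Int) = PySem.Int.mod ((PySem.List.slice Q none
        (some (bsGo Q (min N (Q.length : Int)).toNat 0 (min N (Q.length : Int))))).sum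
      - PySem.Int.floordiv ((bsGo Q (min N (Q.length : Int)).toNat 0 (min N (Q.length : Int)))
        * ((bsGo Q (min N (Q.length : Int)).toNat 0 (min N (Q.length : Int))) - 1)) 2) pyMOD
    have hbs : bsGo Q (min N (Q.length : Int)).toNat 0 (min N (Q.length : Int)) = 0 := by
      rw [hmin]
      have : N.toNat = 0 := by omega
      rw [this]
      simp [bsGo]
    rw [hbs, PySem.List.slice_to Q (le_refl (0:Int))]
    simp [PySem.Int.floordiv_eq_ediv_of_pos (show (0:Int) < 2 by norm_num),
      PySem.Int.mod_eq_emod_of_pos pyMOD_pos]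
  · by_cases hex : ∃ i, i < N.toNat ∧ ¬((i : Int) ≤ (PySem.List.sorted P (fun x => x) true).getD i 0)
    · refine main_core N P hPre hN (Nat.find hex) (le_of_lt (Nat.find_spec hex).1) ?_ ?_
      · intro i hi
        have h1 := Nat.find_min hex hi
        push_neg at h1
        exact h1 (lt_of_lt_of_le hi (le_of_lt (Nat.find_spec hex).1))
      · intro _; exact (Nat.find_spec hex).2
    · push_neg at hex
      exact main_core N P hPre hN N.toNat (le_refl _) hex (fun h => absurd h (lt_irrefl _))
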